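-- pv_equiv track=rewrite | github.com/daz3d/DazToBlender | Blender/appdata_common/Blender Foundation/Blender/BLENDER_VERSION/scripts/addons/DTB/DataBase.py | kind9
-- ===== SOURCE A (Python) =====
-- def kind9(arg, lr):
--     bones = ["thigh", "shin", "upper_arm", "forearm"]
--     ans = [
--         "ORG-",
--         "",
--         "_fk",
--         "_ik",
--         "_parent",
--         "DEF-",
--         "DEF-",
--         "MCH-._ik",
--         "MCH-._ik_stretch.",
--     ]  # 6->.001 11, 12
--     for i in range(len(ans)):
--         if i == 0 or i == 5 or i == 6:
--             ans[i] = ans[i] + arg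
--         elif i < 5:
--             ans[i] = arg + ans[i]
--         elif i == 7 or i == 8:
--             ans[i] = "MCH-" + arg + "_ik"
--             if i == 8:
--                 ans[i] += "_stretch"
--         ans[i] += "." + lr
--         if i == 6:
--             ans[i] += ".001"
--     return ans
-- ===== SOURCE B (Python) =====
-- def kind9(arg, lr):
--     return [
--         "ORG-" + arg + "." + lr,
--         arg + "." + lr,
--         arg + "_fk." + lr,
--         arg + "_ik." + lr,
--         arg + "_parent." + lr,
--         "DEF-" + arg + "." + lr,
--         "DEF-" + arg + "." + lr + ".001",
--         "MCH-" + arg + "_ik." + lr,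
--         "MCH-" + arg + "_ik_stretch." + lr,
--     ]
-- ===== Notes on version B (the rewrite author's own statement) =====
-- stated objective: simpler
-- what changed: Replaced the index-driven loop with its in-place list mutation and branch-per-index logic by a direct 9-element list literal of the fully concatenated names.
import Mathlib
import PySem

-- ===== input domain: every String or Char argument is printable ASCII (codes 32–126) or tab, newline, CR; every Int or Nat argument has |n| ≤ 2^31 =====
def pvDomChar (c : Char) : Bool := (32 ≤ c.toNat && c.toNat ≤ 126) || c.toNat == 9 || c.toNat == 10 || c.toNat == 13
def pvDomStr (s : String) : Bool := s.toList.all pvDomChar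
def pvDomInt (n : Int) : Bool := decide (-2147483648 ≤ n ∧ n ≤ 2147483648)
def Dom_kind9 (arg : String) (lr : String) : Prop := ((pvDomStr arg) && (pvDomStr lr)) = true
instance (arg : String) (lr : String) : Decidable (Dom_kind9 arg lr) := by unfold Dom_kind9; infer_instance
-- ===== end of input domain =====

-- B replaces A's index-branching loop over a mutated list by a direct 9-element list literal (simpler).


-- ===== PORT A =====
-- Python list indexing/assignment 'ans[i]'/'ans[i] = …' is ported by hand with List.getD/List.set at
-- i.toNat: exact here because i ranges over range(len(ans)) = 0..8, all in range and non-negative.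
def kind9 (arg : String) (lr : String) : List String :=
  let ans : List String :=
    ["ORG-", "", "_fk", "_ik", "_parent", "DEF-", "DEF-", "MCH-._ik", "MCH-._ik_stretch."]
  (PySem.List.pyRange 0 (ans.length : Int) 1).foldl (fun a i =>
    let a :=
      if i == 0 || i == 5 || i == 6 then
        a.set i.toNat (a.getD i.toNat "" ++ arg)
      else if i < 5 then
        a.set i.toNat (arg ++ a.getD i.toNat "")
      else if i == 7 || i == 8 then
        let a := a.set i.toNat ("MCH-" ++ arg ++ "_ik")
        if i == 8 then a.set i.toNat (a.getD i.toNat "" ++ "_stretch") else a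
      else a
    let a := a.set i.toNat (a.getD i.toNat "" ++ ("." ++ lr))
    if i == 6 then a.set i.toNat (a.getD i.toNat "" ++ ".001") else a) ans

-- ===== PORT B =====
def kind9_alt (arg : String) (lr : String) : List String :=
  [ "ORG-" ++ arg ++ "." ++ lr,
    arg ++ "." ++ lr,
    arg ++ "_fk." ++ lr,
    arg ++ "_ik." ++ lr,
    arg ++ "_parent." ++ lr,
    "DEF-" ++ arg ++ "." ++ lr,
    "DEF-" ++ arg ++ "." ++ lr ++ ".001",
    "MCH-" ++ arg ++ "_ik." ++ lr,
    "MCH-" ++ arg ++ "_ik_stretch." ++ lr ]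

-- ===== PRECONDITION & SPEC =====
def Spec_kind9 (arg : String) (lr : String) (out : List String) : Prop := out = kind9_alt arg lr
instance (arg : String) (lr : String) (out : List String) : Decidable (Spec_kind9 arg lr out) := by unfold Spec_kind9; infer_instance

-- ===== CLAIM (what is proved, stated in full; the proofs are below) =====
def Claim_equal_kind9 : Prop := ∀ (arg : String) (lr : String), Dom_kind9 arg lr → Spec_kind9 arg lr (kind9 arg lr)

-- ===== LEMMAS AND PROOFS =====

-- ===== VERDICT (by name: the statement is the Claim_ definition above) =====
theorem kind9_spec : Claim_equal_kind9 := by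
  intro arg lr _
  show kind9 arg lr = kind9_alt arg lr
  simp [kind9, kind9_alt, PySem.List.pyRange, List.range_succ, String.append_assoc]
  and_intros <;> rw [← String.append_assoc] <;> rfl
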